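-- pv_equiv track=rewrite | github.com/jpseawell/node_to_text | dsl/parser.py | _extract_candidate_lines
-- ===== SOURCE A (Python) =====
-- def _extract_candidate_lines(text: str) -> str | None:
--     lines = text.splitlines()
--     candidate_lines: list[str] = []
--     found_dsl_line = False
--
--     for raw_line in lines:
--         stripped = raw_line.strip()
--         if not stripped:
--             if found_dsl_line:
--                 candidate_lines.append("")
--             continue
--         if stripped.startswith(("#", "tree ", "interface ", "node ", "connect ")):
--             candidate_lines.append(stripped)
--             found_dsl_line = found_dsl_line or stripped.startswith(("tree ", "interface ", "node ", "connect "))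
--
--     if not found_dsl_line:
--         return None
--     return "\n".join(candidate_lines).strip()
-- ===== SOURCE B (Python) =====
-- KEYWORDS = ("tree ", "interface ", "node ", "connect ")
--
-- def _extract_candidate_lines(text: str) -> str | None:
--     stripped = [line.strip() for line in text.splitlines()]
--     i = next((k for k, s in enumerate(stripped) if s.startswith(KEYWORDS)), None)
--     if i is None:
--         return None
--     kept = [s for s in stripped[:i] if s.startswith("#")]
--     kept += [s for s in stripped[i:] if not s or s.startswith(("#",) + KEYWORDS)]
--     return "\n".join(kept).strip()
-- ===== Notes on version B (the rewrite author's own statement) =====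
-- stated objective: alternative
-- what changed: Replaces A's single pass with a running found_dsl_line flag by locating the index of the first keyword line and building the kept lines in two shaped passes (comments-only before it, comments/keywords/blanks from it on).
import Mathlib
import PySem

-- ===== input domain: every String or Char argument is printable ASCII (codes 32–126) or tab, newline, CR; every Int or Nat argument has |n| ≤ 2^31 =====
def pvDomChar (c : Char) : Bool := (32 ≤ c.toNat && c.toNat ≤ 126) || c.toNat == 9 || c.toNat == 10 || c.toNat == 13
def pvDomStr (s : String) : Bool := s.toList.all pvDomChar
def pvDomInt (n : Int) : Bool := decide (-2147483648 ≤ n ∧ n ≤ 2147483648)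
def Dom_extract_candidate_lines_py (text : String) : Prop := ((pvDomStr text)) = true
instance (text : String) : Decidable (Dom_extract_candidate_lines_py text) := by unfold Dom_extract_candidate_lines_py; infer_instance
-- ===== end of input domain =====

-- B replaces A's single running-flag pass by finding the index of the first keyword
-- line and building the kept lines in two shaped passes around it (objective: alternative decomposition).

-- stripped.startswith(("tree ", "interface ", "node ", "connect "))
def pyIsKw (s : String) : Bool :=
  PySem.Str.startswith s "tree " || PySem.Str.startswith s "interface " ||
  PySem.Str.startswith s "node " || PySem.Str.startswith s "connect "

-- stripped.startswith(("#", "tree ", "interface ", "node ", "connect "))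
def pyStartsAny (s : String) : Bool := PySem.Str.startswith s "#" || pyIsKw s

-- ===== PORT A =====
-- one loop iteration of A: state = (candidate_lines, found_dsl_line)
def stepA (st : List String × Bool) (raw : String) : List String × Bool :=
  let s := PySem.Str.strip raw
  if s = "" then (if st.2 then st.1 ++ [""] else st.1, st.2)
  else if pyStartsAny s then (st.1 ++ [s], st.2 || pyIsKw s)
  else st

def extract_candidate_lines_py (text : String) : Option String :=
  let lines := PySem.Str.splitlines text
  let st := lines.foldl stepA ([], false)
  if !st.2 then none
  else some (PySem.Str.strip (PySem.Str.join "\n" st.1))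

-- ===== PORT B =====
def extract_candidate_lines_py_alt (text : String) : Option String :=
  let stripped := (PySem.Str.splitlines text).map PySem.Str.strip
  match stripped.findIdx? pyIsKw with
  | none => none
  | some i =>
      let kept := (stripped.take i).filter (fun s => PySem.Str.startswith s "#")
        ++ (stripped.drop i).filter (fun s => s == "" || pyStartsAny s)
      some (PySem.Str.strip (PySem.Str.join "\n" kept))

-- ===== PRECONDITION & SPEC =====
def Spec_extract_candidate_lines_py (text : String) (out : Option String) : Prop := out = extract_candidate_lines_py_alt text
instance (text : String) (out : Option String) : Decidable (Spec_extract_candidate_lines_py text out) := by unfold Spec_extract_candidate_lines_py; infer_instance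

-- ===== CLAIM (what is proved, stated in full; the proofs are below) =====
def Claim_equal_extract_candidate_lines_py : Prop := ∀ (text : String), Dom_extract_candidate_lines_py text → Spec_extract_candidate_lines_py text (extract_candidate_lines_py text)

-- ===== LEMMAS AND PROOFS =====

theorem kw_ne_empty {s : String} (h : pyIsKw s = true) : ¬ s = "" := by
  intro he; subst he; simp [pyIsKw] at h
  rcases h with h | h | h | h <;> exact absurd h (by decide)

-- once found_dsl_line is true, A keeps blanks as "" and any comment/keyword line
theorem foldl_stepA_true (ls : List String) : ∀ acc : List String,
    ls.foldl stepA (acc, true) =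
      (acc ++ (ls.map PySem.Str.strip).filter (fun s => s == "" || pyStartsAny s), true) := by
  induction ls with
  | nil => intro acc; simp
  | cons l ls ih =>
    intro acc
    by_cases he : PySem.Str.strip l = ""
    · simp [List.foldl, stepA, he, ih]
    · by_cases ha : pyStartsAny (PySem.Str.strip l) = true
      · simp [List.foldl, stepA, he, ha, ih]
      · simp [List.foldl, stepA, he, ha, ih]

theorem foldl_stepA_none (ls : List String) :
    ∀ acc : List String, (ls.map PySem.Str.strip).findIdx? pyIsKw = none →
    (ls.foldl stepA (acc, false)).2 = false := by
  induction ls with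
  | nil => intro acc _; simp
  | cons l ls ih =>
    intro acc h
    simp only [List.map_cons, List.findIdx?_cons] at h
    by_cases hk : pyIsKw (PySem.Str.strip l) = true
    · simp [hk] at h
    · simp only [hk, if_neg, Bool.false_eq_true, ite_false, Option.map_eq_none_iff] at h
      by_cases he : PySem.Str.strip l = ""
      · simpa [List.foldl, stepA, he] using ih acc h
      · by_cases ha : pyStartsAny (PySem.Str.strip l) = true
        · simpa [List.foldl, stepA, he, ha, hk] using ih (acc ++ [PySem.Str.strip l]) h
        · simpa [List.foldl, stepA, he, ha] using ih acc h

theorem foldl_stepA_some (ls : List String) : ∀ (i : Nat) (acc : List String),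
    (ls.map PySem.Str.strip).findIdx? pyIsKw = some i →
    ls.foldl stepA (acc, false) =
      (acc ++ ((ls.map PySem.Str.strip).take i).filter (fun s => PySem.Str.startswith s "#")
           ++ ((ls.map PySem.Str.strip).drop i).filter (fun s => s == "" || pyStartsAny s), true) := by
  induction ls with
  | nil => intro i acc h; simp at h
  | cons l ls ih =>
    intro i acc h
    simp only [List.map_cons, List.findIdx?_cons] at h
    by_cases hk : pyIsKw (PySem.Str.strip l) = true
    · simp only [hk, ite_true, Option.some.injEq] at h
      subst h
      have he := kw_ne_empty hk
      have ha : pyStartsAny (PySem.Str.strip l) = true := by simp [pyStartsAny, hk]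
      simp [List.foldl, stepA, he, ha, hk, foldl_stepA_true]
    · simp only [hk, Bool.false_eq_true, ite_false, Option.map_eq_some_iff] at h
      obtain ⟨j, hj, hij⟩ := h
      subst hij
      by_cases he : PySem.Str.strip l = ""
      · have hns : PySem.Chars.startswith [] ['#'] = false := by decide
        simp [List.foldl, stepA, he, ih j acc hj, List.filter_cons, hns]
      · by_cases ha : pyStartsAny (PySem.Str.strip l) = true
        · have hs : PySem.Str.startswith (PySem.Str.strip l) "#" = true := by
            rcases Bool.or_eq_true_iff.mp ha with h' | h'
            · exact h'
            · exact absurd h' (by simp [hk])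
          simp at hs
          simp [List.foldl, stepA, he, ha, hk, ih j (acc ++ [PySem.Str.strip l]) hj, List.filter_cons, hs]
        · have hs : PySem.Str.startswith (PySem.Str.strip l) "#" = false := by
            rcases Bool.or_eq_false_iff.mp (Bool.not_eq_true _ ▸ (by simpa using ha) : pyStartsAny (PySem.Str.strip l) = false) with ⟨h1, _⟩
            exact h1
          simp at hs
          simp [List.foldl, stepA, he, ha, ih j acc hj, List.filter_cons, hs]

-- ===== VERDICT (by name: the statement is the Claim_ definition above) =====
theorem extract_candidate_lines_py_spec : Claim_equal_extract_candidate_lines_py := by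
  intro text _
  unfold Spec_extract_candidate_lines_py extract_candidate_lines_py extract_candidate_lines_py_alt
  cases h : ((PySem.Str.splitlines text).map PySem.Str.strip).findIdx? pyIsKw with
  | none =>
      have h2 := foldl_stepA_none (PySem.Str.splitlines text) [] h
      simp only [h2, h, Bool.not_false, ite_true]
  | some i =>
      have h2 := foldl_stepA_some (PySem.Str.splitlines text) i [] h
      simp only [h2, h, Bool.not_true, Bool.false_eq_true, ite_false, List.nil_append]
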